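-- pv_equiv track=rewrite | github.com/basilegithub/General-number-field-sieve | src/polynomial_functions.py | eval_mod
-- ===== SOURCE A (Python) =====
-- def eval_mod(f, x, n):
--     res = 0
--
--     for i in range(len(f)-1):
--         res += f[i]
--         res *= x
--         res %= n
--
--     res += f[-1]
--     res %= n
--
--     return res
-- ===== SOURCE B (Python) =====
-- def eval_mod(f, x, n):
--     res, p = 0, 1
--     for c in reversed(f):
--         res = (res + c * p) % n
--         p = (p * x) % n
--     return res
-- ===== Notes on version B (the rewrite author's own statement) =====
-- stated objective: alternative
-- what changed: Replaces Horner's index-driven left-to-right accumulator with a direct power summation: B iterates over the reversed coefficient list itself (no indices), maintaining a pair (running sum, running power of x) modulo n.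
import Mathlib
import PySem

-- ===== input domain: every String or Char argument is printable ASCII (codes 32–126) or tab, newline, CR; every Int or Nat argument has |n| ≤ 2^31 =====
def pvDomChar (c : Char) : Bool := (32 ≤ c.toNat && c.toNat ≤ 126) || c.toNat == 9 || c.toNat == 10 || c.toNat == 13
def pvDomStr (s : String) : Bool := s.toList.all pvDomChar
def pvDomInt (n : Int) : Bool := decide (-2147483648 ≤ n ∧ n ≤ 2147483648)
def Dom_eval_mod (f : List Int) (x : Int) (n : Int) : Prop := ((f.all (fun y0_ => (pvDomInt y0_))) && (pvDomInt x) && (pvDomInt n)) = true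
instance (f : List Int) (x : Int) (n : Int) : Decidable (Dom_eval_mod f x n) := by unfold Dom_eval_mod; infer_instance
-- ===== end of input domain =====

-- B evaluates the polynomial by direct power summation over the reversed coefficient list
-- (pair state: running sum and running power of x mod n) instead of A's index-driven
-- Horner accumulator; objective: alternative.

-- ===== PORT A =====
def eval_mod (f : List Int) (x : Int) (n : Int) : Int :=
  let res := (PySem.List.pyRange 0 ((f.length : Int) - 1) 1).foldl
    (fun res i => PySem.Int.mod ((res + PySem.List.pyGetD f i 0) * x) n) 0
  PySem.Int.mod (res + PySem.List.pyGetD f (-1) 0) n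

-- ===== PORT B =====
def eval_mod_alt (f : List Int) (x : Int) (n : Int) : Int :=
  ((f.reverse).foldl
    (fun s c => (PySem.Int.mod (s.1 + c * s.2) n, PySem.Int.mod (s.2 * x) n))
    ((0 : Int), (1 : Int))).1

-- ===== PRECONDITION & SPEC =====
-- A raises IndexError on the empty list (f[-1]) and ZeroDivisionError when n = 0; Pre_ excludes exactly those.
def Pre_eval_mod (f : List Int) (x : Int) (n : Int) : Prop := f ≠ [] ∧ n ≠ 0
instance (f : List Int) (x : Int) (n : Int) : Decidable (Pre_eval_mod f x n) := by unfold Pre_eval_mod; infer_instance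
def pvWitness_eval_mod : List Int × Int × Int := ([1, 2, 3], 5, 7)

def Spec_eval_mod (f : List Int) (x : Int) (n : Int) (out : Int) : Prop := out = eval_mod_alt f x n
instance (f : List Int) (x : Int) (n : Int) (out : Int) : Decidable (Spec_eval_mod f x n out) := by unfold Spec_eval_mod; infer_instance

-- ===== CLAIM (what is proved, stated in full; the proofs are below) =====
def Claim_equal_eval_mod : Prop := ∀ (f : List Int) (x : Int) (n : Int), Dom_eval_mod f x n → Pre_eval_mod f x n → Spec_eval_mod f x n (eval_mod f x n)

-- ===== LEMMAS AND PROOFS =====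

-- Python '%' (fmod) reduced again by Lean '%' (emod) gives emod.
theorem pvFmodEmod (a n : Int) : (PySem.Int.mod a n) % n = a % n := by
  simp only [PySem.Int.mod, Int.fmod_eq_emod]
  split_ifs <;> simp [Int.add_emod_right, Int.emod_emod_of_dvd]

theorem pvFmodCongr {a b : Int} (n : Int) (h : a % n = b % n) :
    PySem.Int.mod a n = PySem.Int.mod b n := by
  simp only [PySem.Int.mod, Int.fmod_eq_emod, h]
  have hd : n ∣ a ↔ n ∣ b := by
    rw [← PySem.Int.emod_eq_zero_iff_dvd a n, ← PySem.Int.emod_eq_zero_iff_dvd b n, h]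
  split_ifs with h1 h2 <;> simp_all

-- pure (mod-free) versions of the two loops
def pvFA (x : Int) (l : List Int) (r : Int) : Int := l.foldl (fun a c => (a + c) * x) r
def pvGB (x : Int) (rs : List Int) (s : Int × Int) : Int × Int :=
  rs.foldl (fun s c => (s.1 + c * s.2, s.2 * x)) s
def pvH (x : Int) (rs : List Int) : Int := rs.foldr (fun c a => c + a * x) 0

theorem pvFA_val (x : Int) (l : List Int) (r : Int) :
    pvFA x l r = r * x ^ l.length + x * pvH x l.reverse := by
  induction l using List.reverseRecOn with
  | nil => simp [pvFA, pvH]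
  | append_singleton l c ih =>
    simp only [pvFA, List.foldl_append, List.foldl_cons, List.foldl_nil] at *
    rw [ih]
    simp only [List.reverse_append, List.reverse_cons, List.reverse_nil, List.nil_append,
      List.cons_append, pvH, List.foldr_cons, List.length_append, List.length_cons,
      List.length_nil]
    ring

theorem pvGB_fst (x : Int) (rs : List Int) (res p : Int) :
    (pvGB x rs (res, p)).1 = res + p * pvH x rs := by
  induction rs generalizing res p with
  | nil => simp [pvGB, pvH]
  | cons c rs ih =>
    simp only [pvGB, List.foldl_cons] at *
    rw [ih]
    simp [pvH]
    ring

-- A's mod-reduced Horner loop agrees with the pure one modulo n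
theorem pvCongA (x n : Int) (l : List Int) :
    ∀ r r', r % n = r' % n →
      (l.foldl (fun a c => PySem.Int.mod ((a + c) * x) n) r) % n = (pvFA x l r') % n := by
  induction l with
  | nil => intro r r' h; simpa [pvFA] using h
  | cons c l ih =>
    intro r r' h
    simp only [List.foldl_cons, pvFA] at *
    refine ih _ _ ?_
    rw [pvFmodEmod]
    conv_lhs => rw [Int.mul_emod, Int.add_emod, h, ← Int.add_emod, ← Int.mul_emod]

-- B's mod-reduced loop, once its sum component is an fmod, computes exactly the fmod of the pure value
theorem pvCongB (x n : Int) (rs : List Int) :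
    ∀ res p p', p % n = p' % n →
      (rs.foldl (fun s c => (PySem.Int.mod (s.1 + c * s.2) n, PySem.Int.mod (s.2 * x) n))
        (PySem.Int.mod res n, p)).1 = PySem.Int.mod (pvGB x rs (res, p')).1 n := by
  induction rs with
  | nil => intro res p p' _; simp [pvGB]
  | cons c rs ih =>
    intro res p p' hp
    simp only [List.foldl_cons, pvGB] at *
    have h1 : PySem.Int.mod (PySem.Int.mod res n + c * p) n = PySem.Int.mod (res + c * p') n := by
      refine pvFmodCongr n ?_
      rw [Int.add_emod, pvFmodEmod, Int.mul_emod, hp, ← Int.mul_emod, ← Int.add_emod]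
    have h2 : PySem.Int.mod (p * x) n % n = (p' * x) % n := by
      rw [pvFmodEmod, Int.mul_emod, hp, ← Int.mul_emod]
    rw [h1]
    exact ih (res + c * p') (PySem.Int.mod (p * x) n) (p' * x) h2

-- ===== VERDICT (by name: the statement is the Claim_ definition above) =====
theorem eval_mod_spec : Claim_equal_eval_mod := by
  intro f x n _ hpre
  obtain ⟨hf, hn⟩ := hpre
  unfold Spec_eval_mod eval_mod eval_mod_alt
  have hlen : 0 < f.length := List.length_pos_iff.mpr hf
  set l := f.dropLast with hl
  have hlast : PySem.List.pyGetD f (-1) 0 = f.getLast hf := PySem.List.pyGetD_neg_one f 0 hf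
  -- A side: rewrite the upward index fold to a fold over l
  have hA : (PySem.List.pyRange 0 ((f.length : Int) - 1) 1).foldl
      (fun res i => PySem.Int.mod ((res + PySem.List.pyGetD f i 0) * x) n) 0
      = l.foldl (fun a c => PySem.Int.mod ((a + c) * x) n) 0 := by
    have hb : ((f.length : Int) - 1) = (l.length : Int) := by
      simp [hl, List.length_dropLast]; omega
    rw [hb]
    have hc := PySem.List.foldl_congr_mem (PySem.List.pyRange 0 (l.length : Int))
      (fun res i => PySem.Int.mod ((res + PySem.List.pyGetD f i 0) * x) n)
      (fun res i => PySem.Int.mod ((res + PySem.List.pyGetD l i 0) * x) n) 0 ?_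
    · exact hc.trans (PySem.List.foldl_pyRange_zero_pyGetD' l 0 (fun a c => PySem.Int.mod ((a + c) * x) n) 0)
    · intro acc i hi
      have hmem := (PySem.List.mem_pyRange_one).mp hi
      have hil : PySem.List.pyGetD f i 0 = PySem.List.pyGetD l i 0 := by
        rw [PySem.List.pyGetD_eq_getElem f 0 hmem.1 (by simp [hl, List.length_dropLast] at hmem ⊢; omega),
            PySem.List.pyGetD_eq_getElem l 0 hmem.1 hmem.2]
        simp only [hl]
        rw [List.getElem_dropLast]
      simp only [hil]
  -- B side: f.reverse = getLast :: l.reverse; unroll the first iteration, then pvCongB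
  have hrev : f.reverse = f.getLast hf :: l.reverse := by
    conv_lhs => rw [← List.dropLast_append_getLast hf]
    simp [hl]
  rw [hrev, List.foldl_cons]
  have hstep1 : PySem.Int.mod (0 + f.getLast hf * 1) n = PySem.Int.mod (f.getLast hf) n := by
    ring_nf
  have hstep2 : (PySem.Int.mod (1 * x) n) % n = x % n := by
    rw [pvFmodEmod]; ring_nf
  rw [hstep1, pvCongB x n l.reverse (f.getLast hf) (PySem.Int.mod (1 * x) n) x hstep2]
  simp only [hlast, hA]
  refine pvFmodCongr n ?_
  rw [pvGB_fst]
  have := pvCongA x n l 0 0 rfl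
  rw [Int.add_emod, this, pvFA_val, Int.add_emod (f.getLast hf)]
  simp
  ring_nf
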